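-- pv_equiv track=rewrite | github.com/ronnuriel/AdaptLadder-BCI | scripts/run_t12_geometry_feasibility.py | choose_channel_axis
-- ===== SOURCE A (Python) =====
-- def choose_channel_axis(shape: tuple[int, ...], channel_axis: int | None) -> int:
--     if channel_axis is not None:
--         return channel_axis if channel_axis >= 0 else len(shape) + channel_axis
--     preferred = [idx for idx, dim in enumerate(shape) if dim in (128, 256, 512)]
--     if preferred:
--         return preferred[-1]
--     candidates = [idx for idx, dim in enumerate(shape) if 16 <= dim <= 1024]
--     if candidates:
--         return min(candidates, key=lambda idx: (abs(shape[idx] - 256), -idx))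
--     return len(shape) - 1
-- ===== SOURCE B (Python) =====
-- def choose_channel_axis(shape, channel_axis):
--     if channel_axis is not None:
--         return channel_axis if channel_axis >= 0 else len(shape) + channel_axis
--     if not shape:
--         return -1
--     def key(item):
--         idx, dim = item
--         if dim in (128, 256, 512):
--             return (0, 0, -idx)
--         if 16 <= dim <= 1024:
--             return (1, abs(dim - 256), -idx)
--         return (2, 0, -idx)
--     return min(enumerate(shape), key=key)[0]
-- ===== Notes on version B (the rewrite author's own statement) =====
-- stated objective: alternative
-- what changed: Replaces A's staged selection (preferred filter with last-index pick, then candidate filter with a keyed min, then fallback len-1) by a single min(enumerate(shape), key=...) under one 3-tier lexicographic key triple: (0,0,-idx) for dims in {128,256,512}, (1,|dim-256|,-idx) for dims in [16,1024], (2,0,-idx) otherwise, so all three stages collapse into one argmin.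
import Mathlib
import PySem

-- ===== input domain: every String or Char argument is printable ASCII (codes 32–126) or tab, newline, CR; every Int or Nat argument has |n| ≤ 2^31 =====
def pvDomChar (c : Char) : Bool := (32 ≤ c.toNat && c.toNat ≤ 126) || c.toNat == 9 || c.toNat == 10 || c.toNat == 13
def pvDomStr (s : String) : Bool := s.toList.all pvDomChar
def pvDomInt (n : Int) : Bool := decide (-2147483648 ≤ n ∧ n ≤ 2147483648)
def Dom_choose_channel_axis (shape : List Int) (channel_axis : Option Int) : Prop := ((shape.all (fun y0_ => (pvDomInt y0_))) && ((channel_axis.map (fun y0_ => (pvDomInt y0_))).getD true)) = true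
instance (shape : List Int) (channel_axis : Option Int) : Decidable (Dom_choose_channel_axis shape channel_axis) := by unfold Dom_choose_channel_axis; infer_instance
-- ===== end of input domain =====

-- B replaces A's staged selection (preferred filter, candidate filter, fallback) by ONE keyed
-- min over enumerate(shape) with a 3-tier lexicographic key; objective: alternative decomposition.


-- ===== PORT A =====
-- literal port of A: three comprehensions over enumerate(shape), then preferred[-1], then
-- min(candidates, key=lambda idx: (abs(shape[idx]-256), -idx)) (= PySem.List.min2?, Python's tuple-key min).
-- shape[idx] is ported as pyGetD (exact here: idx comes from enumerate(shape), so always in range).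
def choose_channel_axis (shape : List Int) (channel_axis : Option Int) : Int :=
  match channel_axis with
  | some c => if c ≥ 0 then c else (shape.length : Int) + c
  | none =>
    let preferred := (PySem.List.enumerate shape 0).filterMap
      (fun p => if p.2 = 128 ∨ p.2 = 256 ∨ p.2 = 512 then some p.1 else none)
    if preferred ≠ [] then (PySem.List.pyGet? preferred (-1)).getD 0
    else
      let candidates := (PySem.List.enumerate shape 0).filterMap
        (fun p => if 16 ≤ p.2 ∧ p.2 ≤ 1024 then some p.1 else none)
      if candidates ≠ [] then
        (PySem.List.min2? candidates
          (fun idx => |PySem.List.pyGetD shape idx 0 - 256|) (fun idx => -idx)).getD 0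
      else (shape.length : Int) - 1

-- ===== PORT B =====
-- B-side helpers: caKey is Source B's key(item); keyLt is '<' on Python key TRIPLES (lexicographic),
-- and the fold in the port is the hand port of min(enumerate(shape), key=key): exact because
-- Python's min keeps the FIRST element whose key tuple is lexicographically minimal,
-- i.e. it replaces the running best only on a strictly smaller key.
def caKey (p : Int × Int) : Int × Int × Int :=
  if p.2 = 128 ∨ p.2 = 256 ∨ p.2 = 512 then (0, 0, -p.1)
  else if 16 ≤ p.2 ∧ p.2 ≤ 1024 then (1, |p.2 - 256|, -p.1)
  else (2, 0, -p.1)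

def keyLt (a b : Int × Int × Int) : Bool :=
  decide (a.1 < b.1) ||
    (decide (a.1 = b.1) &&
      (decide (a.2.1 < b.2.1) || (decide (a.2.1 = b.2.1) && decide (a.2.2 < b.2.2))))

def choose_channel_axis_alt (shape : List Int) (channel_axis : Option Int) : Int :=
  match channel_axis with
  | some c => if c ≥ 0 then c else (shape.length : Int) + c
  | none =>
    if shape = [] then -1
    else
      match PySem.List.enumerate shape 0 with
      | [] => -1   -- unreachable: shape ≠ []
      | e :: rest =>
        (rest.foldl (fun acc x => if keyLt (caKey x) (caKey acc) then x else acc) e).1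

-- ===== PRECONDITION & SPEC =====
def Spec_choose_channel_axis (shape : List Int) (channel_axis : Option Int) (out : Int) : Prop := out = choose_channel_axis_alt shape channel_axis
instance (shape : List Int) (channel_axis : Option Int) (out : Int) : Decidable (Spec_choose_channel_axis shape channel_axis out) := by unfold Spec_choose_channel_axis; infer_instance

-- ===== CLAIM (what is proved, stated in full; the proofs are below) =====
def Claim_equal_choose_channel_axis : Prop := ∀ (shape : List Int) (channel_axis : Option Int), Dom_choose_channel_axis shape channel_axis → Spec_choose_channel_axis shape channel_axis (choose_channel_axis shape channel_axis)

-- ===== LEMMAS AND PROOFS =====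

-- keyLt is a strict linear order on key triples (lexicographic on Int components)
theorem keyLt_irrefl (a : Int × Int × Int) : keyLt a a = false := by
  obtain ⟨a1, a2, a3⟩ := a; simp [keyLt]

theorem keyLt_trans (a b c : Int × Int × Int)
    (h1 : keyLt a b = true) (h2 : keyLt b c = true) : keyLt a c = true := by
  obtain ⟨a1, a2, a3⟩ := a; obtain ⟨b1, b2, b3⟩ := b; obtain ⟨c1, c2, c3⟩ := c
  simp [keyLt] at *; omega

theorem keyLt_false_trans (a b c : Int × Int × Int)
    (h1 : keyLt a b = false) (h2 : keyLt b c = false) : keyLt a c = false := by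
  obtain ⟨a1, a2, a3⟩ := a; obtain ⟨b1, b2, b3⟩ := b; obtain ⟨c1, c2, c3⟩ := c
  simp [keyLt] at *; omega

theorem keyLt_antisymm (a b : Int × Int × Int)
    (h1 : keyLt a b = false) (h2 : keyLt b a = false) : a = b := by
  obtain ⟨a1, a2, a3⟩ := a; obtain ⟨b1, b2, b3⟩ := b
  simp [keyLt, Prod.mk.injEq] at *
  omega

theorem caKey_third (p : Int × Int) : (caKey p).2.2 = -p.1 := by
  unfold caKey; split_ifs <;> rfl

-- the 'keep the strictly smaller key' fold (Python's min) yields an element of the list …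
theorem foldl_best_mem {α : Type} (lt : α → α → Bool) (l : List α) (e : α) :
    l.foldl (fun acc x => if lt x acc then x else acc) e ∈ e :: l := by
  induction l generalizing e with
  | nil => simp
  | cons x t ih =>
    simp only [List.foldl_cons]
    by_cases h : lt x e = true
    · simp only [h, if_true]
      rcases List.mem_cons.mp (ih x) with h' | h' <;> simp [h', List.mem_cons]
    · simp only [h, if_false, Bool.false_eq_true]
      rcases List.mem_cons.mp (ih e) with h' | h' <;> simp [h', List.mem_cons]

-- … whose key no element of the list beats (given lt's order laws)
theorem foldl_best_min {α : Type} (lt : α → α → Bool)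
    (htr : ∀ a b c, lt a b = true → lt b c = true → lt a c = true)
    (hft : ∀ a b c, lt a b = false → lt b c = false → lt a c = false)
    (hirr : ∀ a, lt a a = false)
    (l : List α) (e : α) :
    ∀ p ∈ e :: l, lt p (l.foldl (fun acc x => if lt x acc then x else acc) e) = false := by
  induction l generalizing e with
  | nil =>
    intro p hp; simp only [List.mem_singleton] at hp; subst hp
    simpa using hirr _
  | cons x t ih =>
    intro p hp
    simp only [List.foldl_cons]
    by_cases hxe : lt x e = true
    · simp only [hxe, if_true]
      rcases List.mem_cons.mp hp with rfl | hp'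
      · have hxr := ih x x (List.mem_cons_self ..)
        by_cases hpr : lt p (t.foldl (fun acc x => if lt x acc then x else acc) x) = true
        · exact absurd (htr x p _ hxe hpr) (by simp [hxr])
        · simpa using hpr
      · rcases List.mem_cons.mp hp' with rfl | hp''
        · exact ih p p (List.mem_cons_self ..)
        · exact ih x p (List.mem_cons_of_mem _ hp'')
    · have hxe' : lt x e = false := by simpa using hxe
      simp only [hxe', if_false, Bool.false_eq_true]
      rcases List.mem_cons.mp hp with rfl | hp'
      · exact ih p p (List.mem_cons_self ..)
      · rcases List.mem_cons.mp hp' with rfl | hp''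
        · exact hft p e _ hxe' (ih e e (List.mem_cons_self ..))
        · exact ih e p (List.mem_cons_of_mem _ hp'')

-- the fold body PySem.List.min2? is defined by, at A's key (abs(shape[idx]-256), -idx)
def min2Step (shape : List Int) (acc : Option Int) (x : Int) : Option Int :=
  match acc with
  | none => some x
  | some m =>
    if (decide (|PySem.List.pyGetD shape x 0 - 256| < |PySem.List.pyGetD shape m 0 - 256|) ||
        (!decide (|PySem.List.pyGetD shape m 0 - 256| < |PySem.List.pyGetD shape x 0 - 256|) &&
         decide (-x < -m))) = true then some x else some m

theorem min2?_eq_foldl (shape : List Int) (xs : List Int) :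
    PySem.List.min2? xs (fun idx => |PySem.List.pyGetD shape idx 0 - 256|) (fun idx => -idx)
      = xs.foldl (min2Step shape) none := by
  simp only [PySem.List.min2?]
  congr 1
  funext acc x
  cases acc <;> rfl

-- A's candidate key as a key triple (third component padded), so keyLt compares it
def k2 (shape : List Int) (j : Int) : Int × Int × Int :=
  (|PySem.List.pyGetD shape j 0 - 256|, -j, 0)

-- min2?'s fold step is exactly the 'keep the strictly smaller key triple' step under k2
theorem min2Step_eq (shape : List Int) (m x : Int) :
    min2Step shape (some m) x = some (if keyLt (k2 shape x) (k2 shape m) then x else m) := by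
  by_cases h1 : |PySem.List.pyGetD shape x 0 - 256| < |PySem.List.pyGetD shape m 0 - 256| <;>
    by_cases h2 : |PySem.List.pyGetD shape m 0 - 256| < |PySem.List.pyGetD shape x 0 - 256| <;>
    by_cases h3 : (-x : Int) < -m <;>
    simp [min2Step, k2, keyLt, h1, h2, h3] <;> omega

theorem min2fold_eq (shape : List Int) (l : List Int) (c : Int) :
    l.foldl (min2Step shape) (some c)
      = some (l.foldl (fun m x => if keyLt (k2 shape x) (k2 shape m) then x else m) c) := by
  induction l generalizing c with
  | nil => rfl
  | cons x t ih => rw [List.foldl_cons, min2Step_eq]; exact ih _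

-- the last index of a filter over a pairwise-increasing enumeration is its maximum
theorem last_filterMap_max (cond : Int → Prop) [DecidablePred cond] :
    ∀ (P : List (Int × Int)) (i : Int),
      P.Pairwise (fun p q => p.1 < q.1) →
      (P.filterMap (fun p => if cond p.2 then some p.1 else none)).getLast? = some i →
      ∃ d, (i, d) ∈ P ∧ cond d ∧ ∀ p ∈ P, cond p.2 → p.1 ≤ i := by
  intro P
  induction P with
  | nil => intro i _ h; simp at h
  | cons p t ih =>
    intro i hpair h
    by_cases hc : cond p.2
    · have hstep : (List.filterMap (fun p => if cond p.2 then some p.1 else none) (p :: t))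
          = p.1 :: List.filterMap (fun q => if cond q.2 then some q.1 else none) t := by
        simp [hc]
      rw [hstep] at h
      cases hlt : (t.filterMap (fun q => if cond q.2 then some q.1 else none)).getLast? with
      | none =>
        have hnil := List.getLast?_eq_none_iff.mp hlt
        rw [hnil] at h
        simp only [List.getLast?_singleton, Option.some.injEq] at h
        subst h
        refine ⟨p.2, by simp, hc, ?_⟩
        intro q hq hcq
        rcases List.mem_cons.mp hq with rfl | hq'
        · exact le_refl _
        · exfalso
          have : q.1 ∈ t.filterMap (fun q => if cond q.2 then some q.1 else none) :=
            List.mem_filterMap.mpr ⟨q, hq', by simp [hcq]⟩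
          rw [hnil] at this; simp at this
      | some j =>
        have hne : (t.filterMap (fun q => if cond q.2 then some q.1 else none)) ≠ [] := by
          intro hn; rw [hn] at hlt; simp at hlt
        cases hfm : t.filterMap (fun q => if cond q.2 then some q.1 else none) with
        | nil => exact absurd hfm hne
        | cons b l =>
          rw [hfm, List.getLast?_cons_cons] at h
          rw [hfm] at hlt
          obtain ⟨d, hmem, hcd, hmax⟩ := ih i hpair.of_cons (by rw [hfm]; exact h)
          refine ⟨d, List.mem_cons_of_mem _ hmem, hcd, ?_⟩
          intro q hq hcq
          rcases List.mem_cons.mp hq with rfl | hq'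
          · exact le_of_lt ((List.pairwise_cons.mp hpair).1 (i, d) hmem)
          · exact hmax q hq' hcq
    · have hstep : (List.filterMap (fun p => if cond p.2 then some p.1 else none) (p :: t))
          = List.filterMap (fun q => if cond q.2 then some q.1 else none) t := by
        simp [hc]
      rw [hstep] at h
      obtain ⟨d, hmem, hcd, hmax⟩ := ih i hpair.of_cons h
      refine ⟨d, List.mem_cons_of_mem _ hmem, hcd, ?_⟩
      intro q hq hcq
      rcases List.mem_cons.mp hq with rfl | hq'
      · exact absurd hcq hc
      · exact hmax q hq' hcq

-- A's result, for shape ≠ [] and channel_axis None, is the index component of an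
-- enumerate(shape) pair whose caKey no other pair's caKey beats (B's argmin condition).
theorem A_min_witness (shape : List Int) (hne : shape ≠ []) :
    ∃ w, w ∈ PySem.List.enumerate shape 0 ∧
      choose_channel_axis shape none = w.1 ∧
      ∀ p ∈ PySem.List.enumerate shape 0, keyLt (caKey p) (caKey w) = false := by
  have hE : ∀ p ∈ PySem.List.enumerate shape 0, PySem.List.pyGetD shape p.1 0 = p.2 := by
    intro p hp
    rw [PySem.List.mem_enumerate_iff] at hp
    obtain ⟨k, hk, rfl⟩ := hp
    simp [PySem.List.pyGetD_natCast, List.getD_eq_getElem?_getD, hk]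
  have hpair := PySem.List.pairwise_lt_enumerate shape 0
  simp only [choose_channel_axis]
  cases hpl : ((PySem.List.enumerate shape 0).filterMap
      (fun p => if p.2 = 128 ∨ p.2 = 256 ∨ p.2 = 512 then some p.1 else none)).getLast? with
  | some i =>
    obtain ⟨d, hmem, hcond, hmax⟩ :=
      last_filterMap_max (fun d => d = 128 ∨ d = 256 ∨ d = 512) _ i hpair hpl
    refine ⟨(i, d), hmem, ?_, ?_⟩
    · have hne' : ((PySem.List.enumerate shape 0).filterMap
          (fun p => if p.2 = 128 ∨ p.2 = 256 ∨ p.2 = 512 then some p.1 else none)) ≠ [] := by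
        intro h; rw [h] at hpl; simp at hpl
      simp [hne', PySem.List.pyGet?_neg_one, hpl]
    · intro p hp
      have hkw : caKey (i, d) = (0, 0, -i) := by simp [caKey, hcond]
      by_cases h1 : p.2 = 128 ∨ p.2 = 256 ∨ p.2 = 512
      · have := hmax p hp h1
        rw [hkw]; simp [caKey, keyLt, h1]; omega
      · rw [hkw]
        by_cases h2 : 16 ≤ p.2 ∧ p.2 ≤ 1024 <;> simp [caKey, keyLt, h1, h2]
  | none =>
    have hnil : ((PySem.List.enumerate shape 0).filterMap
        (fun p => if p.2 = 128 ∨ p.2 = 256 ∨ p.2 = 512 then some p.1 else none)) = [] :=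
      List.getLast?_eq_none_iff.mp hpl
    have hnp : ∀ p ∈ PySem.List.enumerate shape 0, ¬(p.2 = 128 ∨ p.2 = 256 ∨ p.2 = 512) := by
      intro p hp hc
      have := List.filterMap_eq_nil_iff.mp hnil p hp
      simp [hc] at this
    simp only [hnil, ne_eq, not_true_eq_false, if_false]
    cases hcd : ((PySem.List.enumerate shape 0).filterMap
        (fun p => if 16 ≤ p.2 ∧ p.2 ≤ 1024 then some p.1 else none)) with
    | cons c rest =>
      have hmineq : PySem.List.min2? (c :: rest)
          (fun idx => |PySem.List.pyGetD shape idx 0 - 256|) (fun idx => -idx)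
          = some (rest.foldl (fun m x => if keyLt (k2 shape x) (k2 shape m) then x else m) c) := by
        rw [min2?_eq_foldl]
        rw [List.foldl_cons]
        have : min2Step shape none c = some c := rfl
        rw [this, min2fold_eq]
      have hrmem : rest.foldl (fun m x => if keyLt (k2 shape x) (k2 shape m) then x else m) c
          ∈ c :: rest :=
        foldl_best_mem (fun a b => keyLt (k2 shape a) (k2 shape b)) rest c
      have hrmin : ∀ j ∈ c :: rest,
          keyLt (k2 shape j)
            (k2 shape (rest.foldl (fun m x => if keyLt (k2 shape x) (k2 shape m) then x else m) c))
            = false :=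
        foldl_best_min (fun a b => keyLt (k2 shape a) (k2 shape b))
          (fun a b c' h1 h2 => keyLt_trans _ _ _ h1 h2)
          (fun a b c' h1 h2 => keyLt_false_trans _ _ _ h1 h2)
          (fun a => keyLt_irrefl _) rest c
      set r := rest.foldl (fun m x => if keyLt (k2 shape x) (k2 shape m) then x else m) c with hr
      rw [← hcd] at hrmem
      obtain ⟨q, hqE, hq⟩ := List.mem_filterMap.mp hrmem
      have hq2 : (16 ≤ q.2 ∧ q.2 ≤ 1024) ∧ q.1 = r := by
        by_cases h : 16 ≤ q.2 ∧ q.2 ≤ 1024 <;> simp [h] at hq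
        exact ⟨h, hq⟩
      obtain ⟨hqc, hq1⟩ := hq2
      have hdq : PySem.List.pyGetD shape r 0 = q.2 := by rw [← hq1]; exact hE q hqE
      have hnq : ¬(q.2 = 128 ∨ q.2 = 256 ∨ q.2 = 512) := hnp q hqE
      refine ⟨q, hqE, ?_, ?_⟩
      · simp only [reduceCtorEq, not_false_eq_true, if_true, hmineq, Option.getD_some]
        exact hq1.symm
      · intro p hp
        have hnp1 := hnp p hp
        have hkw : caKey q = (1, |q.2 - 256|, -q.1) := by
          simp [caKey, hnq, hqc]
        by_cases h2 : 16 ≤ p.2 ∧ p.2 ≤ 1024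
        · have hpc : p.1 ∈ c :: rest := by
            rw [← hcd]; exact List.mem_filterMap.mpr ⟨p, hp, by simp [h2]⟩
          have hmin := hrmin p.1 hpc
          have hdp : PySem.List.pyGetD shape p.1 0 = p.2 := hE p hp
          simp [k2, hdp, hdq, keyLt] at hmin
          rw [hkw]; simp [caKey, keyLt, hnp1, h2]
          omega
        · rw [hkw]; simp [caKey, keyLt, hnp1, h2]
    | nil =>
      have hnc : ∀ p ∈ PySem.List.enumerate shape 0, ¬(16 ≤ p.2 ∧ p.2 ≤ 1024) := by
        intro p hp hc
        have := List.filterMap_eq_nil_iff.mp hcd p hp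
        simp [hc] at this
      have hlen : 1 ≤ shape.length := by
        cases shape with | nil => exact absurd rfl hne | cons _ _ => simp
      have hk : shape.length - 1 < shape.length := by omega
      have hwE : ((0 : Int) + ((shape.length - 1 : Nat) : Int), shape[shape.length - 1])
          ∈ PySem.List.enumerate shape 0 :=
        (PySem.List.mem_enumerate_iff shape 0 _).mpr ⟨shape.length - 1, hk, rfl⟩
      have hnw1 := hnp _ hwE
      have hnw2 := hnc _ hwE
      refine ⟨_, hwE, ?_, ?_⟩
      · simp only [not_true_eq_false, if_false]
        omega
      · intro p hp
        have hn1 := hnp p hp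
        have hn2 := hnc p hp
        obtain ⟨k', hk', rfl⟩ := (PySem.List.mem_enumerate_iff shape 0 p).mp hp
        simp only [caKey, keyLt] at *
        simp [hn1, hn2, hnw1, hnw2]
        omega

-- ===== VERDICT (by name: the statement is the Claim_ definition above) =====
theorem choose_channel_axis_spec : Claim_equal_choose_channel_axis := by
  intro shape channel_axis _
  unfold Spec_choose_channel_axis
  cases channel_axis with
  | some c => rfl
  | none =>
    by_cases hne : shape = []
    · subst hne; decide
    · obtain ⟨w, hwmem, hA, hwmin⟩ := A_min_witness shape hne
      rw [hA]
      cases hEcons : PySem.List.enumerate shape 0 with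
      | nil => rw [hEcons] at hwmem; simp at hwmem
      | cons e rest =>
        simp only [choose_channel_axis_alt, if_neg hne, hEcons]
        have hrmem : rest.foldl (fun acc x => if keyLt (caKey x) (caKey acc) then x else acc) e
            ∈ e :: rest :=
          foldl_best_mem (fun a b => keyLt (caKey a) (caKey b)) rest e
        have hrmin : ∀ p ∈ e :: rest,
            keyLt (caKey p)
              (caKey (rest.foldl (fun acc x => if keyLt (caKey x) (caKey acc) then x else acc) e))
              = false :=
          foldl_best_min (fun a b => keyLt (caKey a) (caKey b))
            (fun a b c h1 h2 => keyLt_trans _ _ _ h1 h2)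
            (fun a b c h1 h2 => keyLt_false_trans _ _ _ h1 h2)
            (fun a => keyLt_irrefl _) rest e
        set r := rest.foldl (fun acc x => if keyLt (caKey x) (caKey acc) then x else acc) e with hr
        have h1 : keyLt (caKey w) (caKey r) = false := hrmin w (hEcons ▸ hwmem)
        have h2 : keyLt (caKey r) (caKey w) = false := hwmin r (hEcons ▸ hrmem)
        have heq : caKey w = caKey r := keyLt_antisymm _ _ h1 h2
        have h3 : -w.1 = -r.1 := by rw [← caKey_third, ← caKey_third, heq]
        omega
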